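-- pv_equiv track=rewrite | github.com/kducasse/CodingProjects | wcTool/ccwc.py | get_count_for_input_stream
-- ===== SOURCE A (Python) =====
-- def get_count_for_input_stream(input_stream):
--     line_count = 0
--     word_count = 0
--     byte_count = 0
--     character_count = 0
--
--     for line in input_stream:
--         line_count += 1
--         words = line.split()
--         word_count += len(words)
--         character_count += sum(len(word) for word in words)
--         byte_count += len(line.encode())  # Counting bytes
--
--     return line_count, word_count, character_count, byte_count
-- ===== SOURCE B (Python) =====
-- def get_count_for_input_stream(input_stream):
--     lines = list(input_stream)
--     line_count = len(lines)
--     word_count = sum(len(line.split()) for line in lines)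
--     character_count = sum(len(w) for line in lines for w in line.split())
--     byte_count = sum(len(line.encode()) for line in lines)
--     return line_count, word_count, character_count, byte_count
-- ===== Notes on version B (the rewrite author's own statement) =====
-- stated objective: alternative
-- what changed: Replaces the single fused accumulation loop over four counters with materializing the stream once and computing each of the four totals in its own independent pass (length, and three sums).
import Mathlib
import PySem

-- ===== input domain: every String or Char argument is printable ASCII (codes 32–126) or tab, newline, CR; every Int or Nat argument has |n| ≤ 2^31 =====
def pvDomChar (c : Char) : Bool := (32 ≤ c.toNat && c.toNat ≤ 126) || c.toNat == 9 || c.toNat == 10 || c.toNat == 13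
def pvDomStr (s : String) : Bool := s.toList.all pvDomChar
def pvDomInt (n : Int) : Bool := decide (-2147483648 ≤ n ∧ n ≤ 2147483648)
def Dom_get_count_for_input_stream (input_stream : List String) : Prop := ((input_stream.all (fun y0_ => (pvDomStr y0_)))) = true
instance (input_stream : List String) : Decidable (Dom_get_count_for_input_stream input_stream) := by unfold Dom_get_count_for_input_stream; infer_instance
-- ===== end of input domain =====

-- ===== PORT A =====
-- Fused loop over the stream accumulating all four counters at once.
-- len(line.encode()) is ported as PySem.Str.len line: exact on the stated ASCII domain (1 byte per char).
def get_count_for_input_stream (input_stream : List String) : Int × Int × Int × Int :=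
  input_stream.foldl
    (fun st line =>
      let words := PySem.Str.split₀ line
      (st.1 + 1, st.2.1 + PySem.List.len words,
       st.2.2.1 + words.foldl (fun s w => s + PySem.Str.len w) 0,
       st.2.2.2 + PySem.Str.len line))
    (0, 0, 0, 0)

-- ===== PORT B =====
-- Four independent passes over the materialized list (len(line.encode()) → PySem.Str.len: exact on ASCII).
def get_count_for_input_stream_alt (input_stream : List String) : Int × Int × Int × Int :=
  let lines := input_stream
  (PySem.List.len lines,
   (lines.map (fun l => PySem.List.len (PySem.Str.split₀ l))).sum,
   (lines.flatMap (fun l => (PySem.Str.split₀ l).map PySem.Str.len)).sum,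
   (lines.map PySem.Str.len).sum)

-- ===== PRECONDITION & SPEC =====
def Spec_get_count_for_input_stream (input_stream : List String) (out : Int × Int × Int × Int) : Prop := out = get_count_for_input_stream_alt input_stream
instance (input_stream : List String) (out : Int × Int × Int × Int) : Decidable (Spec_get_count_for_input_stream input_stream out) := by unfold Spec_get_count_for_input_stream; infer_instance

-- ===== CLAIM (what is proved, stated in full; the proofs are below) =====
def Claim_equal_get_count_for_input_stream : Prop := ∀ (input_stream : List String), Dom_get_count_for_input_stream input_stream → Spec_get_count_for_input_stream input_stream (get_count_for_input_stream input_stream)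

-- ===== LEMMAS AND PROOFS =====

theorem innerSum_eq (ws : List String) (c : Int) :
    ws.foldl (fun s w => s + PySem.Str.len w) c = c + (ws.map PySem.Str.len).sum := by
  induction ws generalizing c with
  | nil => simp
  | cons w t ih => rw [List.foldl_cons, ih]; simp; ring

theorem foldA_eq (xs : List String) (a b c d : Int) :
    xs.foldl
      (fun st line =>
        let words := PySem.Str.split₀ line
        (st.1 + 1, st.2.1 + PySem.List.len words,
         st.2.2.1 + words.foldl (fun s w => s + PySem.Str.len w) 0,
         st.2.2.2 + PySem.Str.len line))
      (a, b, c, d)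
    = (a + PySem.List.len xs,
       b + (xs.map (fun l => PySem.List.len (PySem.Str.split₀ l))).sum,
       c + (xs.flatMap (fun l => (PySem.Str.split₀ l).map PySem.Str.len)).sum,
       d + (xs.map PySem.Str.len).sum) := by
  induction xs generalizing a b c d with
  | nil => simp
  | cons x t ih =>
    rw [List.foldl_cons]
    show List.foldl _ (a + 1, b + PySem.List.len (PySem.Str.split₀ x),
      c + (PySem.Str.split₀ x).foldl (fun s w => s + PySem.Str.len w) 0,
      d + PySem.Str.len x) t = _
    rw [ih, innerSum_eq]
    refine Prod.ext ?_ (Prod.ext ?_ (Prod.ext ?_ ?_)) <;>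
      simp [List.flatMap_cons] <;> push_cast <;> ring

-- ===== VERDICT (by name: the statement is the Claim_ definition above) =====
theorem get_count_for_input_stream_spec : Claim_equal_get_count_for_input_stream := by
  intro xs _
  show _ = _
  simp only [get_count_for_input_stream, get_count_for_input_stream_alt]
  rw [foldA_eq xs 0 0 0 0]
  simp
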